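/- GENERATED by mk_final_copies.py from the proof of the farm's unit `vorbis_decode_packet_rest.5b` (farm:vorbis_decode_packet_rest.5b.1: Lemmas.lean) as the
   re-elaboration sweep compiled it — do not edit. -/
import Asan.CheckWalk
import Vorbis.Spec.PacketRestFrame
import Vorbis.Spec.Units.vorbis_decode_packet_rest_5b

/-!
  LEMMAS of the unit `vorbis_decode_packet_rest.5b` (started from the head start farm/hints/vorbis_decode_packet_rest.5b.head-start.lean,
  unchanged): the counter lemmas, the floor element's geometry and `g->values` (`nb5b_values`), the bit-level forms of the walker
  (`nb5b_zx8a` …), `nb5b_finalY_site`, `nb5b_finalY_geom`, and STAGE 1 of the segment's walk (`seg5b_to_ret44`: 0x11109c … 0x111123, the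
  first 26 instructions: five of the eight check sites and the exit `At6` CLOSED; the rest from 0x111128 = `ret44` is the hypothesis
  `hrest`, discharged in Proof.lean by the stages `seg5b_ret44_to_ret46` and `seg5b_ret46_to_pred`).
-/

namespace Vorbis.Spec.vorbis_decode_packet_rest_5b
open X86 X86.User Asan Vorbis Vorbis.Spec Vorbis.Spec.vorbis_decode_packet_rest

variable {others : List Obj} {frames : List (Nat × FrameLayout)} {len : Nat} {Ar : Arena} {stored room : Int}
  {ysz : Nat → Nat} {mem : Mem} {f : Nat}

set_option maxRecDepth 40000

/-- The low half of a small counter held in a register is the counter. -/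
theorem nb5b_part32 (j : Nat) (h : j < 2 ^ 31) : (Word.part Width.w32 (UInt64.ofNat j)).toNat = j := by
  rw [Asan.part32_toNat, UInt64.toNat_ofNat']
  omega

/-- The signed compare `cmp [g->values], r13d ; jle`: for small numbers it compares the numbers. -/
theorem nb5b_cmp (V j : Nat) (hV : V < 2 ^ 31) (h : j < 2 ^ 31) :
    ((BitVec.ofNat 32 V).toInt ≤ (Word.part Width.w32 (UInt64.ofNat j)).toInt) ↔ V ≤ j := by
  rw [toInt_of_lt _ (by rw [toNat_ofNat32 V (by omega)]; exact hV), toNat_ofNat32 V (by omega),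
    toInt_of_lt _ (by rw [nb5b_part32 j h]; exact h), nb5b_part32 j h]
  omega

/-- **The floor element `g` and `g->values`**: the dword at `g + 1592` is a number `V`, `2 ≤ V ≤ 250` (FL8), `Floor1.values = V`,
`2·V ≤ ysz i` (FY1); the element lies in the data space and OFF THE STACK REGION (the disjunction the walker needs to read the
element through the stack stores of the segment). -/
theorem nb5b_values {i : Nat} (hinv : DecodeInv others frames len Ar stored room ysz mem f)
    (hi : (i : Int) < stb_vorbis.channels mem f) {g : Nat} (hg : IsFloor mem f g) {r : Word} (hr : r.toNat = g) :
    ∃ V : Nat, 2 ≤ V ∧ V ≤ 250 ∧ 2 * V ≤ ysz i ∧ 0x100000 ≤ g ∧ g + 1596 ≤ 0xC00000 ∧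
      (g + 1596 ≤ 0x700000 ∨ 0x800000 ≤ g) ∧ Floor1.values mem g = (V : Int) ∧ mem.readLE (r + 1592) 4 = V := by
  have hfl := hinv.fb.vorbis.floor
  have hok := hinv.ok
  have hins := hfl.toFloorShape.elem_inside hg hok
  have hin := hfl.toFloorShape.elem_in hg (off := 0) (n := 1596) (by simp only [voff]; omega)
  have hoffst := hinv.offStack _ hfl.FL2
  obtain ⟨idx, hidx, hgeq⟩ := hg
  have hvb := (hfl.floors idx hidx).values_bounds
  have hsz := (hinv.fy i hi).2 idx hidx
  rw [← hgeq] at hvb hsz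
  simp only [vblock, voff, Block.contains] at hin hoffst hins
  have hraw : mem.readLE (addr (g + 1592)) 4 = (Floor1.values mem g).toNat := by
    have hlt := mem.u32_lt (g + 1592)
    have hc := sint32_cases (mem.u32 (g + 1592))
    have hv : Floor1.values mem g = sint32 (mem.u32 (g + 1592)) := by
      simp only [vacc, voff]
      rfl
    rw [hv] at hvb ⊢
    show mem.u32 (g + 1592) = _
    omega
  have ea : r + 1592 = addr (g + 1592) := by
    rw [← hr, ← addr_add_lit, addr_toNat]
  refine ⟨(Floor1.values mem g).toNat, by omega, by omega, by omega, hins.1, hins.2, by omega, by omega, ?_⟩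
  rw [ea, ← hraw]

/-- `movzx r32, byte` of a byte `b`, in the walker's `BitVec.ofNat 8` form, is the word `b`. -/
theorem nb5b_zx8a (b : Nat) (h : b < 256) : Word.ofBV (BitVec.zeroExtend 32 (BitVec.ofNat 8 b)) = UInt64.ofNat b := by
  apply UInt64.toNat_inj.mp
  rw [Vorbis.toNat_ofBV32, UInt64.toNat_ofNat_of_lt' (by unfold UInt64.size; omega)]
  simp only [BitVec.truncate_eq_setWidth, BitVec.toNat_setWidth, BitVec.toNat_ofNat]
  omega

/-- `movzx r32, r8` of a zero-extended byte (`BitVec.ofNat 8` form) is the word `b`. -/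
theorem nb5b_zx8b (b : Nat) (h : b < 256) :
    Word.ofBV (BitVec.zeroExtend 32 (BitVec.setWidth 8 (BitVec.zeroExtend 32 (BitVec.ofNat 8 b)))) = UInt64.ofNat b := by
  apply UInt64.toNat_inj.mp
  rw [Vorbis.toNat_ofBV32, UInt64.toNat_ofNat_of_lt' (by unfold UInt64.size; omega)]
  simp only [BitVec.truncate_eq_setWidth, BitVec.toNat_setWidth, BitVec.toNat_ofNat]
  omega

/-- The dword stored from a twice zero-extended byte (`BitVec.ofNat 8` form) is the number `b`. -/
theorem nb5b_zx8c (b : Nat) (h : b < 256) :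
    (BitVec.zeroExtend 32 (BitVec.setWidth 8 (BitVec.zeroExtend 32 (BitVec.ofNat 8 b)))).toNat = b := by
  simp only [BitVec.truncate_eq_setWidth, BitVec.toNat_setWidth, BitVec.toNat_ofNat]
  omega

/-- `movsxd r64, dword` of a stored zero-extended byte: the word `b`. -/
theorem nb5b_sx32 (b : Nat) (h : b < 256) :
    Word.ofBV (BitVec.signExtend 64 (BitVec.ofNat 32 (b % 4294967296))) = UInt64.ofNat b := by
  apply UInt64.toNat_inj.mp
  rw [Vorbis.Spec.sext32_toNat, UInt64.toNat_ofNat_of_lt' (by unfold UInt64.size; omega)]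
  simp only [BitVec.toNat_ofNat]
  rw [if_pos (by omega)]
  omega

/-- `movzx r32, r8` of the word `b < 256`, in the walker's `Word.part .w8` form, is the word `b`. -/
theorem nb5b_zp8a (b : Nat) (h : b < 256) :
    Word.ofBV (BitVec.zeroExtend 32 (Word.part .w8 (UInt64.ofNat b))) = UInt64.ofNat b := by
  apply UInt64.toNat_inj.mp
  rw [Vorbis.toNat_ofBV32, UInt64.toNat_ofNat_of_lt' (by unfold UInt64.size; omega)]
  unfold Word.part
  simp only [Width.bits, BitVec.truncate_eq_setWidth, BitVec.toNat_setWidth, UInt64.toNat_toBitVec]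
  rw [UInt64.toNat_ofNat_of_lt' (by unfold UInt64.size; omega)]
  omega

/-- The dword stored from `movzx r32, r8` of the word `b < 256` (`Word.part .w8` form) is the number `b`. -/
theorem nb5b_zp8b (b : Nat) (h : b < 256) :
    (BitVec.zeroExtend 32 (Word.part .w8 (UInt64.ofNat b))).toNat = b := by
  unfold Word.part
  simp only [Width.bits, BitVec.truncate_eq_setWidth, BitVec.toNat_setWidth, UInt64.toNat_toBitVec]
  rw [UInt64.toNat_ofNat_of_lt' (by unfold UInt64.size; omega)]
  omega

/-- `movsxd r64, r13d` of the loop counter `j ≤ 250` is the word `j`. -/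
theorem nb5b_sxj (j : Nat) (h : j ≤ 250) :
    Word.ofBV (BitVec.signExtend 64 (Word.part .w32 (UInt64.ofNat j))) = UInt64.ofNat j := by
  apply UInt64.toNat_inj.mp
  rw [Vorbis.Spec.sext32_toNat, Vorbis.toNat_part32, UInt64.toNat_ofNat_of_lt' (by unfold UInt64.size; omega)]
  rw [if_pos (by omega)]
  omega

/-- **The frame object `step2_flag[256]`** (= `do_not_decode`: 256 bytes at `steady rsp + 0x140` = `base + 192`, `base = entry rsp − 2872`) is
an object of the live set of the function's program points: the `ho` of `Vorbis.check_small hat.shadow hun ho (by decide) h1 h2` at the four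
store1 check sites of .5c. -/
theorem nb5b_step2_obj (others : List Obj) (frames : List (Nat × FrameLayout)) (e : State) :
    (⟨(e.reg .rsp).toNat - 2872 + 192, 256, .stack⟩ : Obj) ∈ stackObjs (framesIn frames e) ++ others := by
  apply List.mem_append_left
  unfold framesIn
  rw [stackObjs_cons]
  apply List.mem_append_left
  unfold FrameLayout.objsAt Vorbis.Frames.vorbis_decode_packet_rest
  simp only [List.map_cons, List.mem_cons, true_or, or_true]

/-- **`finalY[k]`, `k < g->values`, is a check site** (2 bytes at `finalY[i] + 2·k`) inside the block at `finalY[i]` (FY1: `2·values ≤ ysz i`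
for every floor of `f`): the load2 check sites 0x111104, 0x111123 (`k = high, low`: `Floor1OK.nb_lt`) and 0x1111b3 (`k = j`). Then
`Vorbis.Spec.check_site hat.shadow hun (nb5b_finalY_site hat.inv hat.i_lt hat.g hk) (by u_omega)`. -/
theorem nb5b_finalY_site {others : List Obj} {frames' : List (Nat × FrameLayout)} {len : Nat} {Ar : Arena} {stored room : Int}
    {ysz : Nat → Nat} {mem : Mem} {f i g k : Nat}
    (hinv : DecodeInv others frames' len Ar stored room ysz mem f) (hi : (i : Int) < stb_vorbis.channels mem f)
    (hg : IsFloor mem f g) (hk : (k : Int) < Floor1.values mem g) :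
    Site (LiveSet others frames') (stb_vorbis.finalY mem f i + 2 * k) 2 := by
  obtain ⟨hblk, hsz⟩ := hinv.fy i hi
  obtain ⟨idx, hidx, rfl⟩ := hg
  have h2 := hsz idx hidx
  exact Site.of_blk hinv.live hblk (by simp only []; omega) (by simp only []; omega) (by omega)


/-- **Where the block at `finalY[c]` lies** (`c < channels`): it has at least 4 bytes (FY1, FL8), it is a setup block of the arena —
above the text, below C00000H, off the stack region INCLUDING the two stack arguments (`0x800020 ≤`: see `SpanOK.geom`) — and apart
from `*f`. Plain arithmetic for the walker's disjointness search and for `side_code` goals of the stores `finalY[k] = …`: name the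
block first (`obtain ⟨fy, hfy⟩ : ∃ fy, stb_vorbis.finalY v.mem (fOf e) i = fy := ⟨_, rfl⟩`, `rw [hfy] at …`). -/
theorem nb5b_finalY_geom (h : DecodeInv others frames len Ar stored room ysz mem f) {c : Nat}
    (hc : (c : Int) < stb_vorbis.channels mem f) :
    4 ≤ ysz c ∧ Vorbis.L.textHi ≤ stb_vorbis.finalY mem f c ∧ stb_vorbis.finalY mem f c + ysz c ≤ 0xC00000 ∧
      (stb_vorbis.finalY mem f c + ysz c ≤ 0x700000 ∨ 0x800020 ≤ stb_vorbis.finalY mem f c) ∧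
      (stb_vorbis.finalY mem f c + ysz c ≤ f ∨ f + 1808 ≤ stb_vorbis.finalY mem f c) := by
  obtain ⟨hblk, hsz⟩ := h.fy c hc
  have hC : SampleBuf (RunBlk Ar len) mem f ⟨stb_vorbis.finalY mem f c, ysz c⟩ := SampleBuf.finalY c hc (ysz c) hblk
  have h1 := h.config.floor.toFloorShape.FL1
  have h0 : ((0 : Nat) : Int) < stb_vorbis.floor_count mem f := by omega
  have hv := (h.config.floor.floor (IsFloor.of_lt h0)).values_bounds
  have hs0 := hsz 0 h0
  have h4 : 4 ≤ ysz c := by omega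
  have hd := h.sep.bufobj _ hC
  simp only [vblock, voff] at hd
  have hA := h.arena
  have htext := h.arenaText
  rcases h.buf _ hC with hz | hb
  · simp only [] at hz
    omega
  · have hr := hA.block_range (p := stb_vorbis.finalY mem f c) (n := ysz c) hb
    have hl := le_r8 (ysz c)
    have a1 := hA.AR1
    have a1x := hA.AR1x
    have a2 := hA.AR2
    refine ⟨h4, ?_, ?_, ?_, ?_⟩ <;> omega


set_option maxHeartbeats 4000000 in
/-- **Segment .5b up to the return of the fourth check call** (0x11109c … 0x111123, returning into 0x111128 = `ret44`): the check of
`g->values` (0x1110a3: `FloorShape.site_elem … 1592 4`), the exit `At6` (`values ≤ j`, closed with `Stable.nb_carry`), the two load1 checks of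
`g->neighbors[j][0/1]` (0x1110c3, 0x1110e0: `site_elem … (1088 + 2·j)`, `(1089 + 2·j)`), the two load2 checks of `finalY[high]`, `finalY[low]`
(0x111104, 0x111123: `nb5b_finalY_site` with FL10 `low, high < j`). The rest of the segment (from 0x111128: the three `Xlist` checks and the
call of predict_point) is the hypothesis `hrest`, about the state AS THE WALKER HAS IT there (`lo`, `hi` = the two neighbours, `fy` = the
`finalY` block, `V` = `g->values`). Walk: 130 s, staged at 0x1110b5. THE TRICK: `lo`, `hi`, `fy` enter the walk as OPAQUE WORDS `wlo whi wfy` (`UInt64.ofNat lo = wlo`, `wlo.toNat = lo`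
in the context; the facts `nb5b_zx8a`, `nb5b_zp8a`, `nb5b_zp8b`, rewritten to the words, and `UInt64.ofNat fy = wfy` passed to `u_walk`): with
`UInt64.ofNat <variable>` in addresses the NEXT stage (0x111128 …) dies at `isDefEq` / `whnf` (4M heartbeats); with the words it walks on to
`ret45` in 15 s (next form to rewrite there: `Word.ofBV (signExtend 64 (BitVec.ofNat 32 ((Word.part .w32 whi).toNat % 4294967296))) = whi`). -/
theorem seg5b_to_ret44 {Lay : Layout} (hLay : Lay.hi = 0x1000000) {μ : Microarch} (hμ : UserX.MicroOK μ) {u₀ : State}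
    (hcode : HasCodeNat Lay u₀ Vorbis.L.vorbis_decode_packet_rest.entry Vorbis.Code.code_vorbis_decode_packet_rest.nat
      Vorbis.L.vorbis_decode_packet_rest.size)
    (hload4 : Asan.SmallCheck Lay μ Vorbis.WayInv (Vorbis.CodeOK u₀) [.rax, .rcx, .rdx] 4 Vorbis.L.__asan_load4_noabort.entry)
    (hload1 : Asan.SmallCheck Lay μ Vorbis.WayInv (Vorbis.CodeOK u₀) [.rax, .rdx] 1 Vorbis.L.__asan_load1_noabort.entry)
    (hload2 : Asan.SmallCheck Lay μ Vorbis.WayInv (Vorbis.CodeOK u₀) [.rax, .rcx, .rdx] 2 Vorbis.L.__asan_load2_noabort.entry)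
    {mode : Nat} {e v : State} {ret : Word} {i j : Nat}
    (hat : AtNbLoop u₀ others frames len Ar stored room mode ysz e ret i j v)
    (Post : State → Prop)
    (hpost : ∀ w, At6 u₀ others frames len Ar stored room mode ysz e ret i w → Post w)
    (hrest : ∀ (s : State) (g V fy lo hi : Nat) (wfy wlo whi : Word),
      (v.reg .r15).toNat = g → Floor1.values v.mem g = (V : Int) → j < V → V ≤ 250 →
      stb_vorbis.finalY v.mem (fOf e) i = fy →
      Floor1.neighbors v.mem g j 0 = lo → Floor1.neighbors v.mem g j 1 = hi → lo < j → hi < j →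
      UInt64.ofNat fy = wfy → UInt64.ofNat lo = wlo → UInt64.ofNat hi = whi →
      s.rip = 0x111128 → s.reg .rsp = e.reg .rsp - 3000 →
      RegsKept [.r12, .rsi, .r14, .rbp, .rbx, .rsp, .rdi, .rax, .rcx, .rdx] v s →
      s.reg .r12 = wfy + whi * 2 →
      s.reg .r14 = UInt64.ofNat j + UInt64.ofNat j →
      s.reg .rbp = wfy + wlo * 2 →
      s.reg .rbx = UInt64.ofNat j →
      s.mem = ((((((v.mem.writeLE (e.reg .rsp - 3008) 8 1118408).writeLE (e.reg .rsp - 3000) 4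
                  (Word.part Width.w32 wlo).toNat).writeLE
                (e.reg .rsp - 3008) 8 1118437).writeLE
              (e.reg .rsp - 2992) 4 (Word.part Width.w32 whi).toNat).writeLE
            (e.reg .rsp - 3008) 8 1118473).writeLE
          (e.reg .rsp - 2984) 2
          (BitVec.setWidth 16 (BitVec.zeroExtend 32
            (BitVec.ofNat 16 (v.mem.readLE (wfy + whi * 2) 2)))).toNat).writeLE
        (e.reg .rsp - 3008) 8 1118504 →
      Mem.EqOn 1048576 1154368 u₀.mem s.mem → s.flags .df = false → s.mxcsr = v.mxcsr →
      ReachVia Lay μ Vorbis.WayInv s Post) :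
    ReachVia Lay μ Vorbis.WayInv v Post := by
  have he := hat.entry
  v_entry he
  have w_rip := hat.rip
  have c_rsp : v.reg .rsp = e.reg .rsp - 3000 := hat.rsp
  have c_r13 : v.reg .r13 = UInt64.ofNat j := hat.r13
  have w_eq : Mem.EqOn Vorbis.L.textLo Vorbis.L.textHi u₀.mem v.mem := hat.code
  have hdf : v.flags .df = false := (show abiInv _ from hat.abi).1
  have hmx : v.mxcsr &&& 0x1F80 = 0x1F80 := (show abiInv _ from hat.abi).2
  have hsse := Vorbis.sseOK_of_abiInv hat.abi
  obtain ⟨g, hg⟩ : ∃ g : Nat, (v.reg .r15).toNat = g := ⟨_, rfl⟩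
  have hgfl : IsFloor v.mem (fOf e) g := by
    rw [← hg]
    exact hat.g
  obtain ⟨V, hV2, hV250, hVy, hg1, hg2, hgoff, hVal, hvalm⟩ := nb5b_values hat.inv hat.i_lt hgfl hg
  obtain ⟨fy, hfy⟩ : ∃ fy : Nat, stb_vorbis.finalY v.mem (fOf e) i = fy := ⟨_, rfl⟩
  obtain ⟨hy4, hyt, hyc, hyoff, hyf⟩ := nb5b_finalY_geom hat.inv hat.i_lt
  rw [hfy] at hyt hyc hyoff hyf
  have hyt' : 0x119d40 ≤ fy := hyt
  have sfy : v.mem.readLE (e.reg .rsp - 2968) 8 = fy := by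
    rw [← hfy, ← hat.slot_finalY]
    show _ = v.mem.readLE _ 8
    congr 1
    u_omega
  have hjle : j ≤ V := by
    have := hat.j_le
    rw [hg, hVal] at this
    omega
  u_walk hcode [hμ.vendor] until [Vorbis.L.vorbis_decode_packet_rest.cut12, 0x1110b5] span [Vorbis.L.textLo, Vorbis.L.textHi] side (v_side)
  · -- 0x1110a3: the check of `g->values`, a field of the floor element
    have hun : ShadowUntouched v.mem s_1110a3.mem := by v_untouched
    have hs := hat.inv.fb.vorbis.floor.toFloorShape.site_elem hat.inv.live hgfl 1592 4 (by simp only [voff]; omega) (by omega) rfl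
    exact Vorbis.Spec.check_site hat.shadow hun hs (by u_omega)
  · -- 0x1110af taken: `values ≤ j` → segment .6 (0x111265)
    refine ReachVia.done (hpost _ ?_)
    have hsame : Mem.SameExcept (nbWins ysz e v.mem i) v.mem s_1110af.mem := by
      unfold nbWins
      u_same
    have hun : ShadowUntouched v.mem s_1110af.mem := by v_untouched
    have habi : abiInv s_1110af := by v_inv
    have e15 : s_1110af.reg .r15 = v.reg .r15 := w_kept .r15 rfl
    obtain ⟨hst, hi', hg', hval, efy, emap⟩ := Stable.nb_carry hat.toStable hat.i_lt hat.g w_rsp w_eq habi hsame hun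
    have q1 : s_1110af.mem.readLE (e.reg .rsp - 2944) 4 = v.mem.readLE (e.reg .rsp - 2944) 4 := by
      u_resolve
    have q2 : s_1110af.mem.readLE (e.reg .rsp - 2952) 8 = v.mem.readLE (e.reg .rsp - 2952) 8 := by
      u_resolve
    have q3 : s_1110af.mem.readLE (e.reg .rsp - 2968) 8 = fy := by
      u_resolve
    refine { toStable := hst, rip := w_rip, g := ?_, slot_i := ?_, i_lt := hi', slot_finalY := ?_, slot_map := ?_ }
    · rw [e15]
      exact hg'
    · show s_1110af.mem.readLE (e.reg .rsp - 3000 + 0x38) 4 = i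
      rw [← hat.slot_i]
      show _ = v.mem.readLE (e.reg .rsp - 3000 + 0x38) 4
      rw [show e.reg .rsp - 3000 + 0x38 = e.reg .rsp - 2944 from by u_omega]
      exact q1
    · show s_1110af.mem.readLE (e.reg .rsp - 3000 + 0x20) 8 = _
      rw [efy, hfy, show e.reg .rsp - 3000 + 0x20 = e.reg .rsp - 2968 from by u_omega]
      exact q3
    · show s_1110af.mem.readLE (e.reg .rsp - 3000 + 0x30) 8 = _
      rw [emap, ← hat.slot_map]
      show _ = v.mem.readLE (e.reg .rsp - 3000 + 0x30) 8
      rw [show e.reg .rsp - 3000 + 0x30 = e.reg .rsp - 2952 from by u_omega]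
      exact q2
  · -- 0x1110af not taken: `j < values`
    have hnV : ¬ V ≤ j := fun h => hbr_1110af ((nb5b_cmp V j (by omega) (by omega)).mpr h)
    have hjV : j < V := by omega
    have sxj := nb5b_sxj j (by omega)
    -- FL10 for this `j`
    have hfl1 := hat.inv.config.floor.floor hgfl
    have hnb : NbOK v.mem g j := hfl1.FL10 j hat.j_ge (by rw [hVal]; omega)
    unfold NbOK at hnb
    obtain ⟨lo, hlo⟩ : ∃ lo : Nat, Floor1.neighbors v.mem g j 0 = lo := ⟨_, rfl⟩
    obtain ⟨hi, hhi⟩ : ∃ hi : Nat, Floor1.neighbors v.mem g j 1 = hi := ⟨_, rfl⟩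
    rw [hlo, hhi] at hnb
    obtain ⟨hloj, hhij, hx1, hx2⟩ := hnb
    have rlo : v.mem.readLE (v.reg .r15 + (UInt64.ofNat j + 544) * 2) 1 = lo := by
      rw [← hlo]
      simp only [vacc, voff]
      show _ = v.mem.readLE (addr _) 1
      congr 1
      apply UInt64.toNat_inj.mp
      rw [toNat_addr _ (by omega)]
      u_omega
    have rhi : v.mem.readLE (v.reg .r15 + UInt64.ofNat j * 2 + 1089) 1 = hi := by
      rw [← hhi]
      simp only [vacc, voff]
      show _ = v.mem.readLE (addr _) 1
      congr 1
      apply UInt64.toNat_inj.mp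
      rw [toNat_addr _ (by omega)]
      u_omega
    obtain ⟨wlo, hwlo⟩ : ∃ w : Word, UInt64.ofNat lo = w := ⟨_, rfl⟩
    obtain ⟨whi, hwhi⟩ : ∃ w : Word, UInt64.ofNat hi = w := ⟨_, rfl⟩
    obtain ⟨wfy, hwfy⟩ : ∃ w : Word, UInt64.ofNat fy = w := ⟨_, rfl⟩
    have twlo : wlo.toNat = lo := by
      rw [← hwlo]
      exact UInt64.toNat_ofNat_of_lt' (by unfold UInt64.size; omega)
    have twhi : whi.toNat = hi := by
      rw [← hwhi]
      exact UInt64.toNat_ofNat_of_lt' (by unfold UInt64.size; omega)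
    have twfy : wfy.toNat = fy := by
      rw [← hwfy]
      exact UInt64.toNat_ofNat_of_lt' (by unfold UInt64.size; omega)
    have zlo := nb5b_zx8a lo (by omega)
    have zhi := nb5b_zx8a hi (by omega)
    have plo := nb5b_zp8a lo (by omega)
    have phi := nb5b_zp8a hi (by omega)
    have plo2 := nb5b_zp8b lo (by omega)
    have phi2 := nb5b_zp8b hi (by omega)
    rw [hwlo] at zlo plo plo2
    rw [hwhi] at zhi phi phi2
    have hloV : ((lo : Nat) : Int) < Floor1.values v.mem g := by
      rw [hVal]
      omega
    have hhiV : ((hi : Nat) : Int) < Floor1.values v.mem g := by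
      rw [hVal]
      omega
    have hfsh := hat.inv.fb.vorbis.floor.toFloorShape
    clear w_acc_1110a3 hbr_1110af
    u_walk hcode [hμ.vendor, sxj, hwfy, zlo, zhi, plo, phi, plo2, phi2] until [Vorbis.L.vorbis_decode_packet_rest.ret44] span [Vorbis.L.textLo, Vorbis.L.textHi] side (v_side)
    · -- 0x1110c3: load1 `g->neighbors[j][0]`
      have hun : ShadowUntouched v.mem s_1110c3.mem := by v_untouched
      have hs := hfsh.site_elem hat.inv.live hgfl (1088 + 2 * j) 1 (by simp only [voff]; omega) (by omega) rfl
      exact Vorbis.Spec.check_site hat.shadow hun hs (by u_omega)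
    · -- 0x1110e0: load1 `g->neighbors[j][1]`
      have hun : ShadowUntouched v.mem s_1110e0.mem := by v_untouched
      have hs := hfsh.site_elem hat.inv.live hgfl (1089 + 2 * j) 1 (by simp only [voff]; omega) (by omega) rfl
      exact Vorbis.Spec.check_site hat.shadow hun hs (by u_omega)
    · -- 0x111104: load2 `finalY[high]`
      have hun : ShadowUntouched v.mem s_111104.mem := by v_untouched
      have hs := nb5b_finalY_site hat.inv hat.i_lt hgfl hhiV
      rw [hfy] at hs
      exact Vorbis.Spec.check_site hat.shadow hun hs (by u_omega)
    · -- 0x111123: load2 `finalY[low]`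
      have hun : ShadowUntouched v.mem s_111123.mem := by v_untouched
      have hs := nb5b_finalY_site hat.inv hat.i_lt hgfl hloV
      rw [hfy] at hs
      exact Vorbis.Spec.check_site hat.shadow hun hs (by u_omega)
    clear w_acc_1110c3 w_acc_1110e0 w_acc_111104 w_acc_111123
    exact hrest s_111123r g V fy lo hi wfy wlo whi hg hVal hjV hV250 hfy hlo hhi hloj hhij hwfy hwlo hwhi w_rip w_rsp w_kept w_r12 w_r14
      w_rbp w_rbx w_mem w_eq w_df_111123 w_mxcsr

end Vorbis.Spec.vorbis_decode_packet_rest_5b
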